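-- pv_equiv track=rewrite | github.com/Suriya-Gurumoorthi/ai_server_backup_code | qwertyuiop/models.py | ensure_one_audio_placeholder_last_user
-- ===== SOURCE A (Python) =====
-- from typing import Optional, Any, Dict, List
--
-- def sanitize_audio_placeholders(text: str) -> str:
--     """Remove all audio placeholders from text to prevent Ultravox pipeline errors"""
--     if not text:
--         return text
--
--     # Remove all variations of audio placeholders
--     text = text.replace('<|audio|>', '')
--     text = text.replace('<|audio|', '')
--     text = text.replace('|audio|>', '')
--     text = text.replace('|audio|', '')
--
--     # Clean up any extra spaces
--     text = ' '.join(text.split())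
--
--     return text.strip()
--
-- def ensure_one_audio_placeholder_last_user(turns: List[Dict[str, str]]) -> List[Dict[str, str]]:
--     """
--     Removes all audio placeholders from all turns except the last user turn,
--     and ensures only one <|audio|> at the end.
--     """
--     if not turns:
--         return turns
--
--     # Find the last user turn
--     last_user_idx = -1
--     for i in range(len(turns) - 1, -1, -1):
--         if turns[i].get("role") == "user":
--             last_user_idx = i
--             break
--
--     if last_user_idx == -1:
--         # No user turns found, return as is
--         return turns
--
--     cleaned = []
--     for idx, turn in enumerate(turns):
--         role = turn.get("role", "")
--         content = turn.get("content", "")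
--
--         # Remove all existing placeholders from all turns
--         content = sanitize_audio_placeholders(content)
--
--         if role == "user" and idx == last_user_idx:
--             # Only the last user turn gets the audio marker
--             # Ensure we don't add multiple placeholders
--             if not content.strip().endswith('<|audio|>'):
--                 content = content + " <|audio|>"
--
--         cleaned.append({
--             "role": role,
--             "content": content
--         })
--
--     return cleaned
-- ===== SOURCE B (Python) =====
-- def sanitize_audio_placeholders(text: str) -> str:
--     """Remove all audio placeholders from text to prevent Ultravox pipeline errors"""
--     if not text:
--         return text
--     text = text.replace('<|audio|>', '')
--     text = text.replace('<|audio|', '')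
--     text = text.replace('|audio|>', '')
--     text = text.replace('|audio|', '')
--     text = ' '.join(text.split())
--     return text.strip()
--
-- def ensure_one_audio_placeholder_last_user(turns):
--     # Single reverse pass: sanitize every turn, mark the first user turn seen
--     # (i.e. the last user turn) with one trailing audio placeholder.
--     out = []
--     marked = False
--     for turn in reversed(turns):
--         role = turn.get("role", "")
--         content = sanitize_audio_placeholders(turn.get("content", ""))
--         if role == "user" and not marked:
--             if not content.strip().endswith('<|audio|>'):
--                 content = content + " <|audio|>"
--             marked = True
--         out.append({"role": role, "content": content})
--     if not marked:
--         # no user turn (or empty input): return the original object unchanged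
--         return turns
--     out.reverse()
--     return out
-- ===== Notes on version B (the rewrite author's own statement) =====
-- stated objective: alternative
-- what changed: Replaced A's two-phase design (a reverse index scan to find the last user turn, then a forward enumerate loop comparing indices) with a single reverse traversal carrying a 'marked' flag that sanitizes each turn and tags the first user turn it meets, reversing the result at the end.
import Mathlib
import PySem

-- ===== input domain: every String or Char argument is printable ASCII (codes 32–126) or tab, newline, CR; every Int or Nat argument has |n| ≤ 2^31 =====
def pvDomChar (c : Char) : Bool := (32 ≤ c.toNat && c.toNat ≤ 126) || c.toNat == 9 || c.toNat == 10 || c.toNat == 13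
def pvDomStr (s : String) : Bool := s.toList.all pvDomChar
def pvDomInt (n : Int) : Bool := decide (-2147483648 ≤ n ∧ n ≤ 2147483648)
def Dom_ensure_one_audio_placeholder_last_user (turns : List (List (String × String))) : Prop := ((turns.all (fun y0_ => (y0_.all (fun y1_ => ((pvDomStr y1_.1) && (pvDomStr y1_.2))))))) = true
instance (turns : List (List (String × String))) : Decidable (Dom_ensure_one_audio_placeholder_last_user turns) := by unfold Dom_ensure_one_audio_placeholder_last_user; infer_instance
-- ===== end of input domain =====

-- B replaces A's two-phase design (reverse index scan for the last user turn, then a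
-- forward enumerate loop comparing indices) by a single reverse traversal with a
-- 'marked' flag; same return value, same O(n) cost (objective: alternative).

-- ===== PORT A =====
-- shared helper: sanitize_audio_placeholders (identical in Source A and Source B)
def pvSanitize (text : String) : String :=
  if text = "" then text
  else
    let t1 := PySem.Str.replace text "<|audio|>" ""
    let t2 := PySem.Str.replace t1 "<|audio|" ""
    let t3 := PySem.Str.replace t2 "|audio|>" ""
    let t4 := PySem.Str.replace t3 "|audio|" ""
    let t5 := PySem.Str.join " " (PySem.Str.split₀ t4)
    PySem.Str.strip t5

-- A's first loop: scan indices downwards, break at the first role == "user".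
-- (the index i is always in range when called from the port; the .getD [] default is unreachable there)
def pvFindLastUser (turns : List (List (String × String))) : List Int → Int
  | [] => -1
  | i :: rest =>
    if ((PySem.Dict.mk ((PySem.List.pyGet? turns i).getD [])).get? "role") == some "user" then i
    else pvFindLastUser turns rest

def ensure_one_audio_placeholder_last_user (turns : List (List (String × String))) : List (List (String × String)) :=
  if turns = [] then turns
  else
    let lastUserIdx := pvFindLastUser turns (PySem.List.pyRange ((turns.length : Int) - 1) (-1) (-1))
    if lastUserIdx = -1 then turns
    else
      (PySem.List.enumerate turns).foldl (fun cleaned p =>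
        let role := (PySem.Dict.mk p.2).getD "role" ""
        let content := pvSanitize ((PySem.Dict.mk p.2).getD "content" "")
        let content :=
          if role = "user" ∧ p.1 = lastUserIdx then
            (if ¬ (PySem.Str.endswith (PySem.Str.strip content) "<|audio|>" = true)
             then content ++ " <|audio|>" else content)
          else content
        cleaned ++ [[("role", role), ("content", content)]]) []

-- ===== PORT B =====
def ensure_one_audio_placeholder_last_user_alt (turns : List (List (String × String))) : List (List (String × String)) :=
  let st := turns.reverse.foldl (fun (st : List (List (String × String)) × Bool) turn =>
    let role := (PySem.Dict.mk turn).getD "role" ""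
    let content := pvSanitize ((PySem.Dict.mk turn).getD "content" "")
    if role = "user" ∧ st.2 = false then
      let content :=
        if ¬ (PySem.Str.endswith (PySem.Str.strip content) "<|audio|>" = true)
        then content ++ " <|audio|>" else content
      (st.1 ++ [[("role", role), ("content", content)]], true)
    else (st.1 ++ [[("role", role), ("content", content)]], st.2)) ([], false)
  if st.2 = false then turns else st.1.reverse

-- ===== PRECONDITION & SPEC =====
def Spec_ensure_one_audio_placeholder_last_user (turns : List (List (String × String))) (out : List (List (String × String))) : Prop := out = ensure_one_audio_placeholder_last_user_alt turns
instance (turns : List (List (String × String))) (out : List (List (String × String))) : Decidable (Spec_ensure_one_audio_placeholder_last_user turns out) := by unfold Spec_ensure_one_audio_placeholder_last_user; infer_instance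

-- ===== CLAIM (what is proved, stated in full; the proofs are below) =====
def Claim_equal_ensure_one_audio_placeholder_last_user : Prop := ∀ (turns : List (List (String × String))), Dom_ensure_one_audio_placeholder_last_user turns → Spec_ensure_one_audio_placeholder_last_user turns (ensure_one_audio_placeholder_last_user turns)

-- ===== LEMMAS AND PROOFS =====

-- the "is a user turn" test, as A's break condition writes it
def pvIsU (t : List (String × String)) : Bool :=
  (PySem.Dict.mk t).get? "role" == some "user"

lemma pvRoleEq (t : List (String × String)) :
    ((PySem.Dict.mk t).getD "role" "" = "user") ↔ pvIsU t = true := by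
  unfold pvIsU
  rw [PySem.Dict.getD_eq_get?_getD]
  cases h : (PySem.Dict.mk t).get? "role" <;> simp_all

-- the per-turn results: unmarked and marked
def pvMkF (t : List (String × String)) : List (String × String) :=
  [("role", (PySem.Dict.mk t).getD "role" ""),
   ("content", pvSanitize ((PySem.Dict.mk t).getD "content" ""))]

def pvMkT (t : List (String × String)) : List (String × String) :=
  let content := pvSanitize ((PySem.Dict.mk t).getD "content" "")
  [("role", (PySem.Dict.mk t).getD "role" ""),
   ("content", if ¬ (PySem.Str.endswith (PySem.Str.strip content) "<|audio|>" = true)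
               then content ++ " <|audio|>" else content)]

-- reference for B's reverse pass
def pvProcRev : Bool → List (List (String × String)) → List (List (String × String))
  | _, [] => []
  | m, t :: rest =>
    if pvIsU t && !m then pvMkT t :: pvProcRev true rest
    else pvMkF t :: pvProcRev m rest

lemma pvBfold (l : List (List (String × String)))
    (acc : List (List (String × String))) (m : Bool) :
    l.foldl (fun (st : List (List (String × String)) × Bool) turn =>
      let role := (PySem.Dict.mk turn).getD "role" ""
      let content := pvSanitize ((PySem.Dict.mk turn).getD "content" "")
      if role = "user" ∧ st.2 = false then
        let content :=
          if ¬ (PySem.Str.endswith (PySem.Str.strip content) "<|audio|>" = true)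
          then content ++ " <|audio|>" else content
        (st.1 ++ [[("role", role), ("content", content)]], true)
      else (st.1 ++ [[("role", role), ("content", content)]], st.2)) (acc, m)
    = (acc ++ pvProcRev m l, m || l.any pvIsU) := by
  induction l generalizing acc m with
  | nil => simp [pvProcRev]
  | cons t rest ih =>
    rw [List.foldl_cons]
    simp only []
    by_cases hc : ((PySem.Dict.mk t).getD "role" "" = "user" ∧ m = false)
    · rw [if_pos hc, ih]
      obtain ⟨h1, h2⟩ := hc
      subst h2
      have hu : pvIsU t = true := (pvRoleEq t).mp h1
      simp [pvProcRev, hu, pvMkT]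
    · rw [if_neg hc, ih]
      cases hm : m
      · have hrole : ¬ ((PySem.Dict.mk t).getD "role" "" = "user") := by
          subst hm; exact fun h => hc ⟨h, rfl⟩
        have hu : pvIsU t = false := by
          cases hx : pvIsU t
          · rfl
          · exact absurd ((pvRoleEq t).mpr hx) hrole
        subst hm
        simp [pvProcRev, hu, pvMkF]
      · subst hm
        cases hx : pvIsU t <;> simp [pvProcRev, hx, pvMkF]

lemma pvProcRev_true (l : List (List (String × String))) :
    pvProcRev true l = l.map pvMkF := by
  induction l with
  | nil => rfl
  | cons t rest ih => simp [pvProcRev, ih]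

lemma pvProcRev_split (l : List (List (String × String))) (u : List (String × String))
    (rest : List (List (String × String))) (hl : l.any pvIsU = false)
    (hu : pvIsU u = true) :
    pvProcRev false (l ++ u :: rest) = l.map pvMkF ++ pvMkT u :: rest.map pvMkF := by
  induction l with
  | nil => simp [pvProcRev, hu, pvProcRev_true]
  | cons t l' ih =>
    simp only [List.any_cons, Bool.or_eq_false_iff] at hl
    simp [pvProcRev, hl.1, ih hl.2]

-- A's find loop returns -1 when no turn is a user turn
lemma pvFind_none (turns : List (List (String × String)))
    (h : turns.any pvIsU = false) (l : List Int) :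
    pvFindLastUser turns l = -1 := by
  induction l with
  | nil => rfl
  | cons i rest ih =>
    unfold pvFindLastUser
    rw [if_neg, ih]
    cases hg : PySem.List.pyGet? turns i with
    | none => simp [PySem.Dict.get?]
    | some t =>
      have ht : t ∈ turns := PySem.List.mem_of_pyGet?_eq_some turns hg
      have := List.any_eq_false.mp h t ht
      simp only [Option.getD_some]
      intro hc
      exact this (by unfold pvIsU; simpa using hc)

-- A's find loop ignores a suffix its index list never reaches
lemma pvFind_agree (xs ys : List (List (String × String))) (l : List Int)
    (h : ∀ i ∈ l, PySem.List.pyGet? xs i = PySem.List.pyGet? ys i) :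
    pvFindLastUser xs l = pvFindLastUser ys l := by
  induction l with
  | nil => rfl
  | cons i rest ih =>
    unfold pvFindLastUser
    rw [h i (by simp), ih (fun j hj => h j (by simp [hj]))]

lemma pvFind_split (p : List (List (String × String))) (u : List (String × String))
    (s : List (List (String × String))) (hu : pvIsU u = true)
    (hs : s.any pvIsU = false) :
    pvFindLastUser (p ++ u :: s)
      (PySem.List.pyRange (((p ++ u :: s).length : Int) - 1) (-1) (-1)) = p.length := by
  induction s using List.reverseRecOn with
  | nil =>
    have hlen : ((p ++ [u]).length : Int) - 1 = (p.length : Int) := by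
      simp
    rw [hlen, PySem.List.pyRange_neg_one_cons (by omega)]
    have hget : PySem.List.pyGet? (p ++ [u]) ((p.length : Int)) = some u := by
      simp
    simp only [pvFindLastUser, hget, Option.getD_some]
    rw [if_pos (show ((PySem.Dict.mk u).get? "role" == some "user") = true from hu)]
  | append_singleton s' t ih =>
    have hs' : s'.any pvIsU = false ∧ pvIsU t = false := by
      simp only [List.any_append, List.any_cons, List.any_nil, Bool.or_eq_false_iff] at hs
      exact ⟨hs.1, hs.2.1⟩
    have hN : (p ++ u :: (s' ++ [t])) = (p ++ u :: s') ++ [t] := by simp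
    have hlen : (((p ++ u :: (s' ++ [t])).length : Int) - 1) = ((p ++ u :: s').length : Int) := by
      rw [hN]
      push_cast [List.length_append, List.length_cons, List.length_nil]
      ring
    rw [hlen, PySem.List.pyRange_neg_one_cons (by omega)]
    have hget : PySem.List.pyGet? (p ++ u :: (s' ++ [t])) (((p ++ u :: s').length : Int)) = some t := by
      rw [hN]
      simpa using PySem.List.pyGet?_append_length (pre := p ++ u :: s') (y := t) (ys := [])
    simp only [pvFindLastUser, hget, Option.getD_some]
    have hneg : ¬ (((PySem.Dict.mk t).get? "role" == some "user") = true) := by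
      intro hc
      have ht : pvIsU t = true := hc
      rw [ht] at hs'
      exact absurd hs'.2 (by simp)
    rw [if_neg hneg, pvFind_agree (p ++ u :: (s' ++ [t])) (p ++ u :: s')
        (PySem.List.pyRange (((p ++ u :: s').length : Int) - 1) (-1) (-1))
        (by
          intro i hi
          rw [PySem.List.mem_pyRange_neg_one] at hi
          have h0 : 0 ≤ i := by omega
          have hlt : i.toNat < (p ++ u :: s').length := by omega
          rw [hN, PySem.List.pyGet?_of_nonneg _ h0, PySem.List.pyGet?_of_nonneg _ h0,
            List.getElem?_append_left hlt])]
    exact ih hs'.1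

-- decompose a list with a user turn at its last user position
lemma pvDecomp (turns : List (List (String × String))) (h : turns.any pvIsU = true) :
    ∃ p u s, turns = p ++ u :: s ∧ pvIsU u = true ∧ s.any pvIsU = false := by
  induction turns using List.reverseRecOn with
  | nil => simp at h
  | append_singleton ts t ih =>
    by_cases ht : pvIsU t = true
    · exact ⟨ts, t, [], by simp, ht, rfl⟩
    · have ht' : pvIsU t = false := by cases hx : pvIsU t <;> simp_all
      have hts : ts.any pvIsU = true := by
        simpa [List.any_append, ht'] using h
      obtain ⟨p, u, s, rfl, hu, hs⟩ := ih hts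
      exact ⟨p, u, s ++ [t], by simp, hu, by simp [hs, ht']⟩

-- A's forward build is a map over the enumeration
lemma pvAfold (turns : List (List (String × String))) (lastIdx : Int) :
    (PySem.List.enumerate turns).foldl (fun cleaned p =>
        let role := (PySem.Dict.mk p.2).getD "role" ""
        let content := pvSanitize ((PySem.Dict.mk p.2).getD "content" "")
        let content :=
          if role = "user" ∧ p.1 = lastIdx then
            (if ¬ (PySem.Str.endswith (PySem.Str.strip content) "<|audio|>" = true)
             then content ++ " <|audio|>" else content)
          else content
        cleaned ++ [[("role", role), ("content", content)]]) []
    = (PySem.List.enumerate turns).map (fun p =>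
        if (PySem.Dict.mk p.2).getD "role" "" = "user" ∧ p.1 = lastIdx
        then pvMkT p.2 else pvMkF p.2) := by
  rw [PySem.List.foldl_append_singleton_eq_map]
  refine List.map_congr_left (fun p _ => ?_)
  by_cases hc : (PySem.Dict.mk p.2).getD "role" "" = "user" ∧ p.1 = lastIdx
  · simp only [if_pos hc, pvMkT]
  · simp only [if_neg hc, pvMkF]

lemma pvEnumMap_notIdx (l : List (List (String × String))) (start : Int) (lastIdx : Int)
    (h : ∀ k : Nat, k < l.length → ¬ (start + (k : Int) = lastIdx)) :
    (PySem.List.enumerate l start).map (fun p =>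
        if (PySem.Dict.mk p.2).getD "role" "" = "user" ∧ p.1 = lastIdx
        then pvMkT p.2 else pvMkF p.2) = l.map pvMkF := by
  induction l generalizing start with
  | nil => rfl
  | cons t rest ih =>
    rw [PySem.List.enumerate_cons]
    simp only [List.map]
    rw [if_neg (fun hc => h 0 (by simp) (by simpa using hc.2))]
    congr 1
    exact ih (start + 1) (fun k hk => by
      have := h (k + 1) (by simp; omega)
      push_cast at this ⊢
      intro hc; exact this (by linarith))

-- main theorem body
lemma pvMain (turns : List (List (String × String))) :
    ensure_one_audio_placeholder_last_user turns
      = ensure_one_audio_placeholder_last_user_alt turns := by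
  by_cases hU : turns.any pvIsU = true
  · obtain ⟨p, u, s, rfl, hu, hs⟩ := pvDecomp turns hU
    have hfind := pvFind_split p u s hu hs
    unfold ensure_one_audio_placeholder_last_user ensure_one_audio_placeholder_last_user_alt
    rw [if_neg (by simp)]
    simp only [hfind]
    rw [if_neg (by omega), pvAfold]
    rw [pvBfold]
    have hany : ((p ++ u :: s).reverse.any pvIsU) = true := by
      simp only [List.any_reverse]; exact hU
    simp only [hany, Bool.or_true]
    rw [if_neg (by simp)]
    have hrev : (p ++ u :: s).reverse = s.reverse ++ u :: p.reverse := by simp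
    rw [hrev, pvProcRev_split _ _ _ (by simp [List.any_reverse, hs]) hu]
    -- right side reversed
    have hB : (s.reverse.map pvMkF ++ pvMkT u :: p.reverse.map pvMkF).reverse
        = p.map pvMkF ++ pvMkT u :: s.map pvMkF := by
      simp
    rw [List.nil_append, hB]
    -- left side: split the enumeration
    rw [show p ++ u :: s = p ++ (u :: s) from rfl, PySem.List.enumerate_append,
      PySem.List.enumerate_cons, List.map_append, List.map_cons]
    congr 1
    · exact pvEnumMap_notIdx p 0 (p.length : Int) (fun k hk => by omega)
    · congr 1
      · rw [if_pos ⟨(pvRoleEq u).mpr hu, by push_cast; ring⟩]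
      · exact pvEnumMap_notIdx s ((0 : Int) + p.length + 1) (p.length : Int)
          (fun k hk => by omega)
  · have hU' : turns.any pvIsU = false := by cases h : turns.any pvIsU <;> simp_all
    have hB : ensure_one_audio_placeholder_last_user_alt turns = turns := by
      unfold ensure_one_audio_placeholder_last_user_alt
      rw [pvBfold]
      simp [List.any_reverse, hU']
    have hA : ensure_one_audio_placeholder_last_user turns = turns := by
      unfold ensure_one_audio_placeholder_last_user
      by_cases he : turns = []
      · simp [he]
      · simp [he, pvFind_none turns hU']
    rw [hA, hB]

-- ===== VERDICT (by name: the statement is the Claim_ definition above) =====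
theorem ensure_one_audio_placeholder_last_user_spec : Claim_equal_ensure_one_audio_placeholder_last_user := by
  intro turns _
  unfold Spec_ensure_one_audio_placeholder_last_user
  exact pvMain turns
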